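-- pv_equiv track=rewrite | github.com/antontomusiak/TopCoder | srm705/super_user_do.py | install
-- ===== SOURCE A (Python) =====
-- def install(A, B):
-- 	count = 0
-- 	list_A = list(A)
-- 	list_B = list(B)
-- 	if len(A) == 1: return (B[0] - A[0] + 1)
-- 	if len(set(B)) == 1 and len(set(A)) == 1 and set(A) == set(B): return 1
-- 	for i in range(len(A)):
-- 		tmp = [x for x in B if x != B[i]]
-- 		if A[i] > max(tmp):
-- 			count +=  B[i] + 1 - A[i]
-- 			list_A.remove(A[i])
-- 			list_B.remove(B[i])
--
-- 	count += max(list_B) - min(list_A) + 1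
-- 	return count
-- ===== SOURCE B (Python) =====
-- def install(A, B):
--     n = len(A)
--     if n == 1:
--         return B[0] - A[0] + 1
--     if len(set(B)) == 1 and len(set(A)) == 1 and set(A) == set(B):
--         return 1
--     m1 = max(B)
--     m2 = max(x for x in B if x != m1)  # second-largest distinct value
--     count = 0
--     remA = []
--     remB = []
--     for a, b in zip(A, B):
--         other_max = m2 if b == m1 else m1
--         if a > other_max:
--             count += b + 1 - a
--         else:
--             remA.append(a)
--             remB.append(b)
--     remB += B[n:]
--     return count + max(remB) - min(remA) + 1
-- ===== Notes on version B (the rewrite author's own statement) =====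
-- stated objective: faster
-- what changed: B precomputes the top-two distinct values of B once, so the per-index rescan max(x for x in B if x != B[i]) becomes an O(1) lookup, and it builds the surviving elements in one zip pass instead of mutating copies with list.remove.
import Mathlib
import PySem

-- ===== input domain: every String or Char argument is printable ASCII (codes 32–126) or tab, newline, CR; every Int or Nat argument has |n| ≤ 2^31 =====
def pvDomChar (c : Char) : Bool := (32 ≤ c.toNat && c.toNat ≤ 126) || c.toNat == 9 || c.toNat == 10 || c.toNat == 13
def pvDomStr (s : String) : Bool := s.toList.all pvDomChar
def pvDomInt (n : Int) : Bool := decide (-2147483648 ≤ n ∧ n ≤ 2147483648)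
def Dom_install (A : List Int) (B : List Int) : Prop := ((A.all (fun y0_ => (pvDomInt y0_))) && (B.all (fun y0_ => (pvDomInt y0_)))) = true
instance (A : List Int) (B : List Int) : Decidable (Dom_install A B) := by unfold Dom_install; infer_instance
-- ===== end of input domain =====

-- B replaces A's per-index rescan of B (max over B minus one value, recomputed for every i)
-- by the precomputed top-two distinct values of B, one O(n) pass: objective 'faster' (asymptotic, O(n^2) → O(n)).

-- ===== PORT A =====
def install (A : List Int) (B : List Int) : Int :=
  let count : Int := 0
  let list_A := A
  let list_B := B
  if PySem.List.len A = 1 then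
    PySem.List.pyGetD B 0 0 - PySem.List.pyGetD A 0 0 + 1
  else if PySem.Set.len (PySem.Set.ofList B) = 1 ∧ PySem.Set.len (PySem.Set.ofList A) = 1 ∧
          PySem.Set.equal (PySem.Set.ofList A) (PySem.Set.ofList B) = true then 1
  else
    let r := (PySem.List.pyRange 0 (PySem.List.len A)).foldl
      (fun (st : Int × List Int × List Int) i =>
        let tmp := B.filter (fun x => x != PySem.List.pyGetD B i 0)
        if PySem.List.pyGetD A i 0 > ((PySem.List.max? tmp (fun x => x)).getD 0) then
          (st.1 + PySem.List.pyGetD B i 0 + 1 - PySem.List.pyGetD A i 0,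
           (PySem.List.remove? st.2.1 (PySem.List.pyGetD A i 0)).getD st.2.1,
           (PySem.List.remove? st.2.2 (PySem.List.pyGetD B i 0)).getD st.2.2)
        else st)
      (count, list_A, list_B)
    r.1 + ((PySem.List.max? r.2.2 (fun x => x)).getD 0) - ((PySem.List.min? r.2.1 (fun x => x)).getD 0) + 1

-- ===== PORT B =====
def install_alt (A : List Int) (B : List Int) : Int :=
  if PySem.List.len A = 1 then
    PySem.List.pyGetD B 0 0 - PySem.List.pyGetD A 0 0 + 1
  else if PySem.Set.len (PySem.Set.ofList B) = 1 ∧ PySem.Set.len (PySem.Set.ofList A) = 1 ∧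
          PySem.Set.equal (PySem.Set.ofList A) (PySem.Set.ofList B) = true then 1
  else
    let m1 := ((PySem.List.max? B (fun x => x)).getD 0)
    let m2 := ((PySem.List.max? (B.filter (fun x => x != m1)) (fun x => x)).getD 0)
    let r := (A.zip B).foldl
      (fun (st : Int × List Int × List Int) ab =>
        let otherMax := if ab.2 = m1 then m2 else m1
        if ab.1 > otherMax then (st.1 + ab.2 + 1 - ab.1, st.2.1, st.2.2)
        else (st.1, st.2.1 ++ [ab.1], st.2.2 ++ [ab.2]))
      (0, [], [])
    let remB := r.2.2 ++ PySem.List.slice B (some (PySem.List.len A)) none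
    r.1 + ((PySem.List.max? remB (fun x => x)).getD 0) - ((PySem.List.min? r.2.1 (fun x => x)).getD 0) + 1

-- ===== PRECONDITION & SPEC =====
-- Pre_ excludes exactly the inputs where the Python A raises (ValueError or IndexError):
-- empty A; len(B) < len(A) (B[i] out of range); B with a single distinct value when the all-equal
-- early return does not fire (max of an empty list); and inputs where every index is removed by the
-- loop, so min of the emptied list raises.  On every other input A returns normally.
def Pre_install (A : List Int) (B : List Int) : Prop :=
  if A.length = 1 then B ≠ []
  else
    2 ≤ A.length ∧
    ((B ≠ [] ∧ (∀ x ∈ B, x = B.headD 0) ∧ (∀ x ∈ A, x = B.headD 0)) ∨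
     (A.length ≤ B.length ∧ (∃ x ∈ B, x ≠ B.headD 0) ∧
      ∃ i < A.length, ∃ x ∈ B, x ≠ B.getD i 0 ∧ A.getD i 0 ≤ x))
instance (A : List Int) (B : List Int) : Decidable (Pre_install A B) := by unfold Pre_install; infer_instance

def pvWitness_install : List Int × List Int := ([1, 2], [3, 4])

def Spec_install (A : List Int) (B : List Int) (out : Int) : Prop := out = install_alt A B
instance (A : List Int) (B : List Int) (out : Int) : Decidable (Spec_install A B out) := by unfold Spec_install; infer_instance

-- ===== CLAIM (what is proved, stated in full; the proofs are below) =====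
def Claim_equal_install : Prop := ∀ (A : List Int) (B : List Int), Dom_install A B → Pre_install A B → Spec_install A B (install A B)

-- ===== LEMMAS AND PROOFS =====

-- max(xs)/min(xs) is characterised by "a member that bounds all members" (values, not positions).
theorem pv_max_id_eq {l : List Int} {m : Int} (hmem : m ∈ l) (hmax : ∀ y ∈ l, y ≤ m) :
    PySem.List.max? l (fun x => x) = some m := by
  cases h : PySem.List.max? l (fun x => x) with
  | none =>
    rw [(PySem.List.max?_eq_none_iff l _).mp h] at hmem
    exact absurd hmem (List.not_mem_nil)
  | some m' =>
    have h1 : m' ∈ l := PySem.List.max?_mem h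
    have h2 : m ≤ m' := PySem.List.max?_isMax h m hmem
    have h3 := hmax m' h1
    have : m' = m := le_antisymm h3 h2
    rw [this]

theorem pv_min_id_eq {l : List Int} {m : Int} (hmem : m ∈ l) (hmin : ∀ y ∈ l, m ≤ y) :
    PySem.List.min? l (fun x => x) = some m := by
  cases h : PySem.List.min? l (fun x => x) with
  | none =>
    rw [(PySem.List.min?_eq_none_iff l _).mp h] at hmem
    exact absurd hmem (List.not_mem_nil)
  | some m' =>
    have h1 : m' ∈ l := PySem.List.min?_mem h
    have h2 : m' ≤ m := PySem.List.min?_isMin h m hmem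
    have : m' = m := le_antisymm h2 (hmin m' h1)
    rw [this]

theorem pv_max_id_perm {l l' : List Int} (h : l.Perm l') :
    PySem.List.max? l (fun x => x) = PySem.List.max? l' (fun x => x) := by
  cases hc : PySem.List.max? l (fun x => x) with
  | none =>
    rw [(PySem.List.max?_eq_none_iff l _).mp hc] at h
    rw [h.nil_eq.symm] at *
    exact hc.symm ▸ ((PySem.List.max?_eq_none_iff [] _).mpr rfl).symm
  | some m =>
    exact (pv_max_id_eq (h.mem_iff.mp (PySem.List.max?_mem hc))
      (fun y hy => PySem.List.max?_isMax hc y (h.mem_iff.mpr hy))).symm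

theorem pv_min_id_perm {l l' : List Int} (h : l.Perm l') :
    PySem.List.min? l (fun x => x) = PySem.List.min? l' (fun x => x) := by
  cases hc : PySem.List.min? l (fun x => x) with
  | none =>
    rw [(PySem.List.min?_eq_none_iff l _).mp hc] at h
    rw [h.nil_eq.symm] at *
    exact hc.symm ▸ ((PySem.List.min?_eq_none_iff [] _).mpr rfl).symm
  | some m =>
    exact (pv_min_id_eq (h.mem_iff.mp (PySem.List.min?_mem hc))
      (fun y hy => PySem.List.min?_isMin hc y (h.mem_iff.mpr hy))).symm


-- a nonempty all-equal list has the one-element set as its set()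
theorem pv_ofList_all_eq {l : List Int} {v : Int} (hne : l ≠ []) (hall : ∀ x ∈ l, x = v) :
    PySem.Set.ofList l = [v] := by
  cases l with
  | nil => exact absurd rfl hne
  | cons x t =>
    have hx : x = v := hall x (by simp)
    subst hx
    rw [PySem.Set.ofList_cons]
    have hd : (PySem.Set.ofList t).discard x = [] := by
      rw [List.eq_nil_iff_forall_not_mem]
      intro y hy
      rw [PySem.Set.mem_discard] at hy
      have hyt : y ∈ t := by
        have h1 := hy.1
        rw [PySem.Set.mem_ofList] at h1
        exact h1
      exact hy.2 (hall y (List.mem_cons_of_mem x hyt))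
    rw [hd]

-- max of B with one value removed, in terms of the top-two distinct values of B
theorem pv_maxExcl {B : List Int} {m1 m2 : Int} (b : Int)
    (hm1 : PySem.List.max? B (fun x => x) = some m1)
    (hm2 : PySem.List.max? (B.filter (fun x => x != m1)) (fun x => x) = some m2) :
    PySem.List.max? (B.filter (fun x => x != b)) (fun x => x) = some (if b = m1 then m2 else m1) := by
  by_cases h : b = m1
  · subst h; rw [if_pos rfl]; exact hm2
  · rw [if_neg h]
    apply pv_max_id_eq
    · rw [List.mem_filter]
      exact ⟨PySem.List.max?_mem hm1, by simp only [bne_iff_ne, ne_eq]; exact fun hc => h hc.symm⟩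
    · intro y hy
      exact PySem.List.max?_isMax hm1 y (List.mem_filter.mp hy).1

-- the two loop bodies, named for the invariant proof
def pvStepA (A B : List Int) (st : Int × List Int × List Int) (i : Nat) : Int × List Int × List Int :=
  let tmp := B.filter (fun x => x != PySem.List.pyGetD B (i : Int) 0)
  if PySem.List.pyGetD A (i : Int) 0 > ((PySem.List.max? tmp (fun x => x)).getD 0) then
    (st.1 + PySem.List.pyGetD B (i : Int) 0 + 1 - PySem.List.pyGetD A (i : Int) 0,
     (PySem.List.remove? st.2.1 (PySem.List.pyGetD A (i : Int) 0)).getD st.2.1,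
     (PySem.List.remove? st.2.2 (PySem.List.pyGetD B (i : Int) 0)).getD st.2.2)
  else st

def pvStepB (m1 m2 : Int) (st : Int × List Int × List Int) (ab : Int × Int) : Int × List Int × List Int :=
  let otherMax := if ab.2 = m1 then m2 else m1
  if ab.1 > otherMax then (st.1 + ab.2 + 1 - ab.1, st.2.1, st.2.2)
  else (st.1, st.2.1 ++ [ab.1], st.2.2 ++ [ab.2])

-- the joint invariant of A's index loop and B's one-pass zip loop
theorem pv_loop (A B : List Int) (m1 m2 : Int)
    (hm1 : PySem.List.max? B (fun x => x) = some m1)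
    (hm2 : PySem.List.max? (B.filter (fun x => x != m1)) (fun x => x) = some m2)
    (hlen : A.length ≤ B.length) :
    ∀ k, k ≤ A.length →
    (((List.range k).foldl (pvStepA A B) ((0 : Int), A, B)).1 =
       (((A.zip B).take k).foldl (pvStepB m1 m2) ((0 : Int), ([] : List Int), ([] : List Int))).1) ∧
    ((List.range k).foldl (pvStepA A B) ((0 : Int), A, B)).2.1.Perm
      ((((A.zip B).take k).foldl (pvStepB m1 m2) ((0 : Int), ([] : List Int), ([] : List Int))).2.1 ++ A.drop k) ∧
    ((List.range k).foldl (pvStepA A B) ((0 : Int), A, B)).2.2.Perm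
      ((((A.zip B).take k).foldl (pvStepB m1 m2) ((0 : Int), ([] : List Int), ([] : List Int))).2.2 ++ B.drop k) := by
  intro k
  induction k with
  | zero => intro _; exact ⟨rfl, by simp, by simp⟩
  | succ k ih =>
    intro hk1
    have hkA : k < A.length := by omega
    have hkB : k < B.length := by omega
    obtain ⟨ih1, ih2, ih3⟩ := ih (by omega)
    have hzip : (A.zip B)[k]? = some (A[k], B[k]) := by
      have hkz : k < (A.zip B).length := by rw [List.length_zip]; omega
      rw [List.getElem?_eq_getElem hkz, List.getElem_zip]
    rw [List.range_succ, List.take_add_one, hzip]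
    simp only [List.foldl_append, List.foldl_cons, List.foldl_nil, Option.toList_some]
    set sA := (List.range k).foldl (pvStepA A B) ((0 : Int), A, B) with hsA
    set sB := ((A.zip B).take k).foldl (pvStepB m1 m2) ((0 : Int), ([] : List Int), ([] : List Int)) with hsB
    have hdropA : A.drop k = A[k] :: A.drop (k + 1) := List.drop_eq_getElem_cons hkA
    have hdropB : B.drop k = B[k] :: B.drop (k + 1) := List.drop_eq_getElem_cons hkB
    have hgA : PySem.List.pyGetD A (k : Int) 0 = A[k] := by
      rw [PySem.List.pyGetD_natCast]; exact List.getD_eq_getElem _ _ hkA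
    have hgB : PySem.List.pyGetD B (k : Int) 0 = B[k] := by
      rw [PySem.List.pyGetD_natCast]; exact List.getD_eq_getElem _ _ hkB
    have hmx := pv_maxExcl (B := B) (B[k]) hm1 hm2
    unfold pvStepA pvStepB
    simp only [hgA, hgB, hmx, Option.getD_some]
    by_cases ht : A[k] > (if B[k] = m1 then m2 else m1)
    · simp only [if_pos ht]
      refine ⟨by rw [ih1], ?_, ?_⟩
      · have hmem : A[k] ∈ sA.2.1 := ih2.mem_iff.mpr
          (by rw [hdropA]; exact List.mem_append_right _ (List.mem_cons_self ..))
        rw [PySem.List.remove?_eq_some_erase _ _ hmem, Option.getD_some]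
        exact ((List.perm_cons_erase hmem).symm.trans
          (ih2.trans (by rw [hdropA]; exact List.perm_middle))).cons_inv
      · have hmem : B[k] ∈ sA.2.2 := ih3.mem_iff.mpr
          (by rw [hdropB]; exact List.mem_append_right _ (List.mem_cons_self ..))
        rw [PySem.List.remove?_eq_some_erase _ _ hmem, Option.getD_some]
        exact ((List.perm_cons_erase hmem).symm.trans
          (ih3.trans (by rw [hdropB]; exact List.perm_middle))).cons_inv
    · simp only [if_neg ht]
      refine ⟨ih1, ?_, ?_⟩
      · rw [List.append_assoc, List.singleton_append, ← hdropA]; exact ih2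
      · rw [List.append_assoc, List.singleton_append, ← hdropB]; exact ih3

-- branch form of A's port in the main (loop) branch
theorem pv_install_main (A B : List Int) (h1 : ¬ PySem.List.len A = 1)
    (hC : ¬ (PySem.Set.len (PySem.Set.ofList B) = 1 ∧ PySem.Set.len (PySem.Set.ofList A) = 1 ∧
             PySem.Set.equal (PySem.Set.ofList A) (PySem.Set.ofList B) = true)) :
    install A B =
      ((List.range A.length).foldl (pvStepA A B) ((0 : Int), A, B)).1
      + ((PySem.List.max? ((List.range A.length).foldl (pvStepA A B) ((0 : Int), A, B)).2.2 (fun x => x)).getD 0)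
      - ((PySem.List.min? ((List.range A.length).foldl (pvStepA A B) ((0 : Int), A, B)).2.1 (fun x => x)).getD 0)
      + 1 := by
  unfold install
  rw [if_neg h1, if_neg hC, PySem.List.len_eq, PySem.List.pyRange_zero_nat, List.foldl_map]
  rfl

-- branch form of B's port in the main (loop) branch
theorem pv_installAlt_main (A B : List Int) (m1 m2 : Int) (h1 : ¬ PySem.List.len A = 1)
    (hC : ¬ (PySem.Set.len (PySem.Set.ofList B) = 1 ∧ PySem.Set.len (PySem.Set.ofList A) = 1 ∧
             PySem.Set.equal (PySem.Set.ofList A) (PySem.Set.ofList B) = true))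
    (hm1 : PySem.List.max? B (fun x => x) = some m1)
    (hm2 : PySem.List.max? (B.filter (fun x => x != m1)) (fun x => x) = some m2) :
    install_alt A B =
      ((A.zip B).foldl (pvStepB m1 m2) ((0 : Int), ([] : List Int), ([] : List Int))).1
      + ((PySem.List.max? (((A.zip B).foldl (pvStepB m1 m2) ((0 : Int), ([] : List Int), ([] : List Int))).2.2
            ++ B.drop A.length) (fun x => x)).getD 0)
      - ((PySem.List.min? ((A.zip B).foldl (pvStepB m1 m2) ((0 : Int), ([] : List Int), ([] : List Int))).2.1
            (fun x => x)).getD 0)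
      + 1 := by
  unfold install_alt
  rw [if_neg h1, if_neg hC]
  simp only [hm1, Option.getD_some, hm2, PySem.List.len_eq, PySem.List.slice_from_natCast]
  rfl

-- ===== VERDICT (by name: the statement is the Claim_ definition above) =====
theorem install_spec : Claim_equal_install := by
  intro A B _ hpre
  unfold Spec_install
  by_cases h1 : PySem.List.len A = 1
  · unfold install install_alt
    rw [if_pos h1, if_pos h1]
  · by_cases hC : PySem.Set.len (PySem.Set.ofList B) = 1 ∧ PySem.Set.len (PySem.Set.ofList A) = 1 ∧
        PySem.Set.equal (PySem.Set.ofList A) (PySem.Set.ofList B) = true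
    · unfold install install_alt
      rw [if_neg h1, if_neg h1, if_pos hC, if_pos hC]
    · have h1' : ¬ A.length = 1 := by
        intro h; apply h1; rw [PySem.List.len_eq, h]; rfl
      unfold Pre_install at hpre
      rw [if_neg h1'] at hpre
      obtain ⟨h2, hdisj⟩ := hpre
      have hmain : A.length ≤ B.length ∧ (∃ x ∈ B, x ≠ B.headD 0) := by
        rcases hdisj with ⟨hBne, hallB, hallA⟩ | hmain
        · exfalso; apply hC
          have hAne : A ≠ [] := by
            intro h; rw [h] at h2; simp at h2
          have hsB := pv_ofList_all_eq hBne hallB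
          have hsA := pv_ofList_all_eq hAne hallA
          refine ⟨by rw [hsB]; simp [PySem.Set.len], by rw [hsA]; simp [PySem.Set.len], ?_⟩
          rw [hsA, hsB]
          exact (PySem.Set.equal_iff _ _).mpr (fun x => Iff.rfl)
        · exact ⟨hmain.1, hmain.2.1⟩
      obtain ⟨hAB, hdist⟩ := hmain
      have hBne : B ≠ [] := by
        intro h
        rw [h] at hAB
        simp only [List.length_nil, Nat.le_zero] at hAB
        omega
      obtain ⟨m1, hm1⟩ : ∃ m1, PySem.List.max? B (fun x => x) = some m1 := by
        cases h : PySem.List.max? B (fun x => x) with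
        | none => exact absurd ((PySem.List.max?_eq_none_iff B _).mp h) hBne
        | some m => exact ⟨m, rfl⟩
      obtain ⟨x, hxB, hxh⟩ := hdist
      have hhead : B.headD 0 ∈ B := by
        cases B with
        | nil => exact absurd rfl hBne
        | cons c t => exact List.mem_cons_self ..
      have hex : ∃ y ∈ B, y ≠ m1 := by
        by_cases hxm : x = m1
        · refine ⟨B.headD 0, hhead, fun hc => hxh ?_⟩
          rw [hc, ← hxm]
        · exact ⟨x, hxB, hxm⟩
      obtain ⟨y, hyB, hym⟩ := hex
      have hyf : y ∈ B.filter (fun x => x != m1) :=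
        List.mem_filter.mpr ⟨hyB, by simp only [bne_iff_ne, ne_eq]; exact hym⟩
      obtain ⟨m2, hm2⟩ : ∃ m2, PySem.List.max? (B.filter (fun x => x != m1)) (fun x => x) = some m2 := by
        cases h : PySem.List.max? (B.filter (fun x => x != m1)) (fun x => x) with
        | none =>
          rw [(PySem.List.max?_eq_none_iff _ _).mp h] at hyf
          exact absurd hyf (List.not_mem_nil)
        | some m => exact ⟨m, rfl⟩
      rw [pv_install_main A B h1 hC, pv_installAlt_main A B m1 m2 h1 hC hm1 hm2]
      obtain ⟨e1, p2, p3⟩ := pv_loop A B m1 m2 hm1 hm2 hAB A.length (le_refl _)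
      rw [List.take_of_length_le (by rw [List.length_zip]; omega)] at e1 p2 p3
      rw [List.drop_length, List.append_nil] at p2
      rw [e1, pv_min_id_perm p2, pv_max_id_perm p3]
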